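-- pv_equiv track=rewrite | github.com/rali-07/CS | sort.py | insertion_sort_generator
-- ===== SOURCE A (Python) =====
-- def insertion_sort_generator(arr):
--     """插入排序，每次移动元素时 yield 两个索引"""
--     n = len(arr)
--     for i in range(1, n):
--         key = arr[i]
--         j = i - 1
--         while j >= 0 and arr[j] > key:
--             arr[j + 1] = arr[j]
--             yield (j, j + 1)
--             j -= 1
--         arr[j + 1] = key
--     yield None
-- ===== SOURCE B (Python) =====
-- def insertion_sort_generator(arr):
--     """Insertion sort yielding each (from, to) move; binary search finds the
--     insertion point, then the suffix is shifted in one block. Mutates arr like A."""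
--     n = len(arr)
--     for i in range(1, n):
--         key = arr[i]
--         lo, hi = 0, i
--         while lo < hi:
--             mid = (lo + hi) // 2
--             if key < arr[mid]:
--                 hi = mid
--             else:
--                 lo = mid + 1
--         for j in range(i - 1, lo - 1, -1):
--             arr[j + 1] = arr[j]
--             yield (j, j + 1)
--         arr[lo] = key
--     yield None
-- ===== Notes on version B (the rewrite author's own statement) =====
-- stated objective: alternative
-- what changed: The linear right-to-left comparison scan is replaced by a binary search for the insertion point on the sorted prefix, followed by a block shift of the suffix; the yielded (j, j+1) trace is identical because on a sorted prefix bisect-right lands exactly where the strict > scan stops.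
import Mathlib
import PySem

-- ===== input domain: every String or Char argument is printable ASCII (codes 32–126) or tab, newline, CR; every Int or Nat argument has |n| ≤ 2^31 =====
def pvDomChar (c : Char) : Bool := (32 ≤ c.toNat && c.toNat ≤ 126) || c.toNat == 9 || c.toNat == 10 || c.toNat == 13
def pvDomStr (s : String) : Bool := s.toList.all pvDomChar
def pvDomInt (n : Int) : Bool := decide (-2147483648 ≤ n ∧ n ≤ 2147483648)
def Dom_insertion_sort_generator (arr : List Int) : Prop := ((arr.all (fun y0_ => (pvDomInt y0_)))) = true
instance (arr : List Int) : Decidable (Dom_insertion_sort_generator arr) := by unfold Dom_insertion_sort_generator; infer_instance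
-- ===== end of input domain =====

-- B replaces the inner linear comparison scan by a binary search for the insertion
-- point followed by a block shift; same yielded trace. Both Pythons mutate arr in
-- place identically; the equivalence proved is about the yielded sequence (the value).

-- ===== PORT A =====
-- inner while-loop of A: 'while j >= 0 and arr[j] > key: arr[j+1] = arr[j]; yield (j, j+1); j -= 1'
-- fuel = j + 1 (the 0 case is the 'j >= 0' test failing); returns (array, yields, final j)
def pvInnerA (a : List Int) (key : Int) : Nat → List Int × List (Int × Int) × Int
  | 0 => (a, [], -1)
  | f + 1 =>
    if key < a.getD f 0 then
      let a' := a.set (f + 1) (a.getD f 0)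
      let r := pvInnerA a' key f
      (r.1, ((f : Int), (f : Int) + 1) :: r.2.1, r.2.2)
    else (a, [], (f : Int))

def insertion_sort_generator (arr : List Int) : List (Option (Int × Int)) :=
  let n := arr.length
  let st := (List.range' 1 (n - 1)).foldl
    (fun (st : List Int × List (Int × Int)) i =>
      let a := st.1
      let key := a.getD i 0
      let r := pvInnerA a key i
      (r.1.set (r.2.2 + 1).toNat key, st.2 ++ r.2.1)) (arr, [])
  st.2.map Option.some ++ [none]

-- ===== PORT B =====
-- binary search: 'while lo < hi: mid = (lo+hi)//2; if key < arr[mid]: hi = mid else: lo = mid+1'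
-- fuel ≥ hi - lo makes the loop structural; it is called with fuel = i ≥ hi - lo
def pvBisect (a : List Int) (key : Int) : Nat → Nat → Nat → Nat
  | 0, lo, _ => lo
  | f + 1, lo, hi =>
    if lo < hi then
      let mid := (lo + hi) / 2
      if key < a.getD mid 0 then pvBisect a key f lo mid
      else pvBisect a key f (mid + 1) hi
    else lo

-- block shift: 'for j in range(i-1, lo-1, -1): arr[j+1] = arr[j]; yield (j, j+1)'
-- as a count-down over the i - lo iterations, current j = stop + c
def pvShiftB (a : List Int) (stop : Nat) : Nat → List Int × List (Int × Int)
  | 0 => (a, [])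
  | c + 1 =>
    let j := stop + c
    let a' := a.set (j + 1) (a.getD j 0)
    let r := pvShiftB a' stop c
    (r.1, ((j : Int), (j : Int) + 1) :: r.2)

def insertion_sort_generator_alt (arr : List Int) : List (Option (Int × Int)) :=
  let n := arr.length
  let st := (List.range' 1 (n - 1)).foldl
    (fun (st : List Int × List (Int × Int)) i =>
      let a := st.1
      let key := a.getD i 0
      let lo := pvBisect a key i 0 i
      let r := pvShiftB a lo (i - lo)
      (r.1.set lo key, st.2 ++ r.2)) (arr, [])
  st.2.map Option.some ++ [none]

-- ===== PRECONDITION & SPEC =====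
def Spec_insertion_sort_generator (arr : List Int) (out : List (Option (Int × Int))) : Prop := out = insertion_sort_generator_alt arr
instance (arr : List Int) (out : List (Option (Int × Int))) : Decidable (Spec_insertion_sort_generator arr out) := by unfold Spec_insertion_sort_generator; infer_instance

-- ===== CLAIM (what is proved, stated in full; the proofs are below) =====
def Claim_equal_insertion_sort_generator : Prop := ∀ (arr : List Int), Dom_insertion_sort_generator arr → Spec_insertion_sort_generator arr (insertion_sort_generator arr)

-- ===== LEMMAS AND PROOFS =====

-- the first i entries (read via getD) are nondecreasing
def SortedPref (a : List Int) (i : Nat) : Prop :=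
  ∀ k l : Nat, k < l → l < i → a.getD k 0 ≤ a.getD l 0

theorem getD_set_ne (l : List Int) (i j : Nat) (v : Int) (h : i ≠ j) :
    (l.set i v).getD j 0 = l.getD j 0 := by
  simp [List.getD_eq_getElem?_getD, List.getElem?_set_ne h]

theorem getD_set_self (l : List Int) (i : Nat) (v : Int) (h : i < l.length) :
    (l.set i v).getD i 0 = v := by
  simp [List.getD_eq_getElem?_getD, h]

theorem pvBisect_spec (a : List Int) (key : Int) (i : Nat) (hs : SortedPref a i) :
    ∀ (n lo hi : Nat), hi - lo ≤ n → lo ≤ hi → hi ≤ i →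
    (∀ k, k < lo → a.getD k 0 ≤ key) → (∀ k, hi ≤ k → k < i → key < a.getD k 0) →
    pvBisect a key n lo hi ≤ i ∧
    (∀ k, k < pvBisect a key n lo hi → a.getD k 0 ≤ key) ∧
    (∀ k, pvBisect a key n lo hi ≤ k → k < i → key < a.getD k 0) := by
  intro n
  induction n with
  | zero =>
    intro lo hi hfuel hle hhi hlo hhiK
    have heq : lo = hi := by omega
    simp only [pvBisect]
    exact ⟨heq ▸ hhi, hlo, fun k hk1 hk2 => hhiK k (by omega) hk2⟩
  | succ n ih =>
    intro lo hi hfuel hle hhi hlo hhiK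
    simp only [pvBisect]
    by_cases h : lo < hi
    · rw [if_pos h]
      have hm1 : lo ≤ (lo + hi) / 2 := by omega
      have hm2 : (lo + hi) / 2 < hi := by omega
      by_cases hc : key < a.getD ((lo + hi) / 2) 0
      · rw [if_pos hc]
        refine ih lo ((lo + hi) / 2) (by omega) (by omega) (by omega) hlo ?_
        intro k hk1 hk2
        rcases Nat.eq_or_lt_of_le hk1 with heq | hlt
        · exact heq ▸ hc
        · exact lt_of_lt_of_le hc (hs _ k hlt hk2)
      · rw [if_neg hc]
        refine ih ((lo + hi) / 2 + 1) hi (by omega) (by omega) hhi ?_ hhiK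
        intro k hk
        rcases Nat.lt_succ_iff_lt_or_eq.mp hk with hlt | heq
        · exact le_trans (hs k _ hlt (by omega)) (not_lt.mp hc)
        · exact heq ▸ not_lt.mp hc
    · rw [if_neg h]
      have heq : lo = hi := by omega
      exact ⟨heq ▸ hhi, hlo, fun k hk1 hk2 => hhiK k (by omega) hk2⟩

theorem shift_spec (key : Int) (p : Nat) :
    ∀ (m : Nat) (a : List Int),
    (∀ k, p ≤ k → k < p + m → key < a.getD k 0) →
    (∀ k, k < p → a.getD k 0 ≤ key) →
    p + m < a.length →
    ∃ f t, pvInnerA a key (p + m) = (f, t, (p : Int) - 1) ∧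
      pvShiftB a p m = (f, t) ∧
      f.length = a.length ∧
      (∀ k, k ≤ p ∨ p + m < k → f.getD k 0 = a.getD k 0) ∧
      (∀ k, p < k → k ≤ p + m → f.getD k 0 = a.getD (k - 1) 0) := by
  intro m
  induction m with
  | zero =>
    intro a _ h2 _
    refine ⟨a, [], ?_, rfl, rfl, fun _ _ => rfl, fun k h h' => by omega⟩
    by_cases hp0 : p = 0
    · subst hp0
      norm_num [pvInnerA]
    · obtain ⟨q, rfl⟩ : ∃ q, p = q + 1 := ⟨p - 1, by omega⟩
      simp only [pvInnerA]
      rw [if_neg (not_lt.mpr (h2 q (by omega)))]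
      have e : (q : Int) = ((q + 1 : Nat) : Int) - 1 := by push_cast; ring
      rw [e]
  | succ m ih =>
    intro a h1 h2 hlen
    have hidx : p + m + 1 < a.length := by omega
    set a' := a.set (p + m + 1) (a.getD (p + m) 0) with ha'
    have hlen' : a'.length = a.length := by simp [ha']
    have hne : ∀ k, k ≠ p + m + 1 → a'.getD k 0 = a.getD k 0 := by
      intro k hk; exact getD_set_ne a (p + m + 1) k _ (fun h => hk h.symm)
    have hself : a'.getD (p + m + 1) 0 = a.getD (p + m) 0 := getD_set_self a _ _ hidx
    obtain ⟨f, t, hA, hB, hflen, hkeep, hshift⟩ := ih a'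
      (fun k hk1 hk2 => by rw [hne k (by omega)]; exact h1 k hk1 (by omega))
      (fun k hk => by rw [hne k (by omega)]; exact h2 k hk)
      (by omega)
    refine ⟨f, (((p + m : Nat) : Int), ((p + m : Nat) : Int) + 1) :: t, ?_, ?_, by omega, ?_, ?_⟩
    · have e : p + (m + 1) = (p + m) + 1 := by omega
      rw [e]
      simp only [pvInnerA]
      rw [if_pos (h1 (p + m) (by omega) (by omega)), ← ha', hA]
    · simp only [pvShiftB]
      rw [← ha', hB]
    · intro k hk
      rcases hk with hk | hk
      · rw [hkeep k (Or.inl hk), hne k (by omega)]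
      · rw [hkeep k (Or.inr (by omega)), hne k (by omega)]
    · intro k hk1 hk2
      by_cases hk : k = p + m + 1
      · subst hk
        rw [hkeep (p + m + 1) (Or.inr (by omega)), hself]
        congr 1
      · rw [hshift k hk1 (by omega), hne (k - 1) (by omega)]

theorem step_eq (a : List Int) (i : Nat) (h1 : 1 ≤ i) (hi : i < a.length)
    (hs : SortedPref a i) :
    ∃ b t,
      (let key := a.getD i 0
       let r := pvInnerA a key i
       ((r.1.set (r.2.2 + 1).toNat key, r.2.1) : List Int × List (Int × Int))) = (b, t) ∧
      (let key := a.getD i 0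
       let lo := pvBisect a key i 0 i
       let r := pvShiftB a lo (i - lo)
       ((r.1.set lo key, r.2) : List Int × List (Int × Int))) = (b, t) ∧
      b.length = a.length ∧ SortedPref b (i + 1) := by
  set key := a.getD i 0 with hkey
  obtain ⟨hp1, hp2, hp3⟩ := pvBisect_spec a key i hs i 0 i (by omega) (by omega) (le_refl i)
    (by omega) (by intro k h h'; omega)
  set p := pvBisect a key i 0 i with hpdef
  have hpm : p + (i - p) = i := by omega
  obtain ⟨f, t, hA, hB, hflen, hkeep, hshift⟩ := shift_spec key p (i - p) a
    (fun k hk1 hk2 => hp3 k hk1 (by omega)) hp2 (by omega)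
  rw [hpm] at hA hkeep hshift
  have hpl : p < f.length := by omega
  refine ⟨f.set p key, t, ?_, ?_, by simp [hflen], ?_⟩
  · show ((pvInnerA a key i).1.set ((pvInnerA a key i).2.2 + 1).toNat key,
        (pvInnerA a key i).2.1) = _
    rw [hA]
    show (f.set ((p : Int) - 1 + 1).toNat key, t) = _
    congr 2
    omega
  · show ((pvShiftB a p (i - p)).1.set p key, (pvShiftB a p (i - p)).2) = _
    rw [hB]
  · -- sortedness of the new prefix of length i + 1
    intro k l hkl hl
    have hbk : ∀ j : Nat, j < i + 1 →
        (f.set p key).getD j 0 = if j = p then key else if j < p then a.getD j 0 else a.getD (j - 1) 0 := by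
      intro j hj
      by_cases hjp : j = p
      · subst hjp; rw [getD_set_self f _ _ hpl]; simp
      · rw [getD_set_ne f p j _ (fun h => hjp h.symm)]
        by_cases hjlt : j < p
        · rw [hkeep j (Or.inl (by omega))]; simp [hjp, hjlt]
        · rw [hshift j (by omega) (by omega)]; simp [hjp, hjlt]
    rw [hbk k (by omega), hbk l hl]
    by_cases hkp : k = p <;> by_cases hlp : l = p
    · omega
    · subst hkp
      simp only [if_neg hlp]
      have hlgt : ¬ l < p := by omega
      rw [if_neg hlgt]
      exact le_of_lt (hp3 (l - 1) (by omega) (by omega))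
    · subst hlp
      simp only [if_neg hkp]
      have hklt : k < p := by omega
      rw [if_pos hklt]
      exact hp2 k hklt
    · simp only [if_neg hkp, if_neg hlp]
      by_cases hklt : k < p
      · rw [if_pos hklt]
        by_cases hllt : l < p
        · rw [if_pos hllt]
          exact hs k l hkl (by omega)
        · rw [if_neg hllt]
          exact le_of_lt (lt_of_le_of_lt (hp2 k hklt) (hp3 (l - 1) (by omega) (by omega)))
      · rw [if_neg hklt]
        have hllt : ¬ l < p := by omega
        rw [if_neg hllt]
        exact hs (k - 1) (l - 1) (by omega) (by omega)

theorem fold_eq (m : Nat) : ∀ (i : Nat) (a : List Int) (ys : List (Int × Int)),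
    1 ≤ i → i + m ≤ a.length → SortedPref a i →
    (List.range' i m).foldl
      (fun (st : List Int × List (Int × Int)) i =>
        let a := st.1
        let key := a.getD i 0
        let r := pvInnerA a key i
        (r.1.set (r.2.2 + 1).toNat key, st.2 ++ r.2.1)) (a, ys) =
    (List.range' i m).foldl
      (fun (st : List Int × List (Int × Int)) i =>
        let a := st.1
        let key := a.getD i 0
        let lo := pvBisect a key i 0 i
        let r := pvShiftB a lo (i - lo)
        (r.1.set lo key, st.2 ++ r.2)) (a, ys) := by
  induction m with
  | zero => intro i a ys _ _ _; rfl
  | succ m ih =>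
    intro i a ys h1 hlen hs
    obtain ⟨b, t, hA, hB, hblen, hbs⟩ := step_eq a i h1 (by omega) hs
    rw [List.range'_succ, List.foldl_cons, List.foldl_cons]
    have hA1 : ((pvInnerA a (a.getD i 0) i).1.set
        ((pvInnerA a (a.getD i 0) i).2.2 + 1).toNat (a.getD i 0)) = b :=
      congrArg Prod.fst hA
    have hA2 : (pvInnerA a (a.getD i 0) i).2.1 = t := congrArg Prod.snd hA
    have hB1 : ((pvShiftB a (pvBisect a (a.getD i 0) i 0 i) (i - pvBisect a (a.getD i 0) i 0 i)).1.set
        (pvBisect a (a.getD i 0) i 0 i) (a.getD i 0)) = b := congrArg Prod.fst hB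
    have hB2 : (pvShiftB a (pvBisect a (a.getD i 0) i 0 i) (i - pvBisect a (a.getD i 0) i 0 i)).2 = t :=
      congrArg Prod.snd hB
    show (List.range' (i + 1) m).foldl _
        ((pvInnerA a (a.getD i 0) i).1.set
          ((pvInnerA a (a.getD i 0) i).2.2 + 1).toNat (a.getD i 0),
         ys ++ (pvInnerA a (a.getD i 0) i).2.1) =
      (List.range' (i + 1) m).foldl _
        ((pvShiftB a (pvBisect a (a.getD i 0) i 0 i) (i - pvBisect a (a.getD i 0) i 0 i)).1.set
          (pvBisect a (a.getD i 0) i 0 i) (a.getD i 0),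
         ys ++ (pvShiftB a (pvBisect a (a.getD i 0) i 0 i) (i - pvBisect a (a.getD i 0) i 0 i)).2)
    rw [hA1, hA2, hB1, hB2]
    exact ih (i + 1) b (ys ++ t) (by omega) (by omega) hbs

-- ===== VERDICT (by name: the statement is the Claim_ definition above) =====
theorem insertion_sort_generator_spec : Claim_equal_insertion_sort_generator := by
  intro arr _
  unfold Spec_insertion_sort_generator insertion_sort_generator insertion_sort_generator_alt
  dsimp only
  by_cases h : arr.length ≤ 1
  · have : arr.length - 1 = 0 := by omega
    rw [this]
    rfl
  · rw [fold_eq (arr.length - 1) 1 arr [] (by omega) (by omega)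
      (fun k l hkl hl => by omega)]
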